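-- pv_equiv track=rewrite | github.com/JuanPabloRosas/EPP-AGRUPAMIENTO | EPP_PSL_AGRUPAMIENTO.py | res
-- ===== SOURCE A (Python) =====
-- def res(a,act,hab1,hab2):
--    suma = 0
--    lista=[a]
--    while(len(lista)>0):
--       act = lista.pop()
--       for h1 in hab1:
--          if(act == h1):
--             suma = suma + 1
--             lista.append(hab1[h1])
--       for h2 in hab2:
--          if(act == h2):
--             suma = suma + 1
--             lista.append(hab2[h2])
--
--    return suma
-- ===== SOURCE B (Python) =====
-- def res(a, act, hab1, hab2):
--     # Recursive DFS: count at node a = sum over both dicts of (1 + count at child)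
--     # whenever a is a key. Direct membership tests replace A's full key scans.
--     s = 0
--     if a in hab1:
--         s += 1 + res(hab1[a], act, hab1, hab2)
--     if a in hab2:
--         s += 1 + res(hab2[a], act, hab1, hab2)
--     return s
-- ===== Notes on version B (the rewrite author's own statement) =====
-- stated objective: simpler
-- what changed: Replaces A's explicit worklist stack that scans every key of both dicts on each pop with a direct recursive DFS using O(1) dict membership/lookup per node.
import Mathlib
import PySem

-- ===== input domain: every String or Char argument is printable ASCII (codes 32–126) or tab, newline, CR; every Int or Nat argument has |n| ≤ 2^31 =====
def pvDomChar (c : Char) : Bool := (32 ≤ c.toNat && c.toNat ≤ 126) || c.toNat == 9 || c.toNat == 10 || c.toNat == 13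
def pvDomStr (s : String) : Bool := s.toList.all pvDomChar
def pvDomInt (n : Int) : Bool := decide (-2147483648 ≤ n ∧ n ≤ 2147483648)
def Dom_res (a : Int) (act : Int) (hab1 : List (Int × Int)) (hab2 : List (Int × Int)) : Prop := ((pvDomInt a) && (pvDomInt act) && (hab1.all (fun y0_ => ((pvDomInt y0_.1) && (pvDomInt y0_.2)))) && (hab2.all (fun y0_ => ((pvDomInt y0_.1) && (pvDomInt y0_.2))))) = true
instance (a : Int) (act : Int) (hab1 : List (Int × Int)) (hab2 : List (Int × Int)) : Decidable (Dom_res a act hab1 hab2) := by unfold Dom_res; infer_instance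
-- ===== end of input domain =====

-- B replaces A's explicit worklist stack (which rescans every key of both dicts per pop)
-- with a direct recursive DFS using dict lookups; return values agree on all acyclic inputs
-- (on cyclic ones A does not return at all — excluded by Pre_res).

-- ===== PORT A =====
-- 'for h1 in hab1: if act == h1: … hab1[h1]' iterates the dict's items (keys unique,
-- the looked-up value is the item's value) — exact.
def resMatch (d : PySem.Dict Int Int) (act : Int) (p : Int × List Int) : Int × List Int :=
  d.items.foldl (fun p kv => if act = kv.1 then (p.1 + 1, p.2 ++ [kv.2]) else p) p

-- A's while-loop over the stack 'lista' (pop from the end); the fuel argument only makes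
-- the definition total — Pre_res guarantees it is never exhausted (proved below).
def resLoop (d1 d2 : PySem.Dict Int Int) : Nat → Int → List Int → Int
  | 0, suma, _ => suma
  | fuel + 1, suma, lista =>
    match lista.getLast? with
    | none => suma
    | some act =>
      let p1 := resMatch d1 act (suma, lista.dropLast)
      let p2 := resMatch d2 act p1
      resLoop d1 d2 fuel p2.1 p2.2

def res (a : Int) (act : Int) (hab1 : List (Int × Int)) (hab2 : List (Int × Int)) : Int :=
  resLoop (PySem.Dict.ofList hab1) (PySem.Dict.ofList hab2)
    (2 ^ (hab1.length + hab2.length + 2)) 0 [a]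

-- ===== PORT B =====
-- B's recursion 'if a in d: s += 1 + res(d[a], …)'; the fuel argument only makes the
-- definition total — on Pre_res the recursion depth is below it (proved below).
def resCnt (d1 d2 : PySem.Dict Int Int) : Nat → Int → Int
  | 0, _ => 0
  | fuel + 1, a =>
    (match d1.get? a with | some v => 1 + resCnt d1 d2 fuel v | none => 0)
      + (match d2.get? a with | some v => 1 + resCnt d1 d2 fuel v | none => 0)

def res_alt (a : Int) (act : Int) (hab1 : List (Int × Int)) (hab2 : List (Int × Int)) : Int :=
  resCnt (PySem.Dict.ofList hab1) (PySem.Dict.ofList hab2) (hab1.length + hab2.length + 1) a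

-- ===== PRECONDITION & SPEC =====
-- Successor-graph vocabulary used only to state (and reason about) acyclicity.
def pvChild (d1 d2 : PySem.Dict Int Int) (x : Int) : List Int :=
  (d1.get? x).toList ++ (d2.get? x).toList

def pvSuccs (d1 d2 : PySem.Dict Int Int) (x : Int) : Finset Int :=
  (pvChild d1 d2 x).toFinset

def pvStep (d1 d2 : PySem.Dict Int Int) (S : Finset Int) : Finset Int :=
  S ∪ S.biUnion (pvSuccs d1 d2)

def pvReach (d1 d2 : PySem.Dict Int Int) (n : Nat) (S : Finset Int) : Finset Int :=
  (pvStep d1 d2)^[n] S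

-- nodes reachable from x (whole closure: reached by ≤ size1+size2+1 expansion steps)
def pvR (d1 d2 : PySem.Dict Int Int) (x : Int) : Finset Int :=
  pvReach d1 d2 (d1.size + d2.size + 1) {x}

-- Pre_res excludes exactly the inputs on which A never returns (it loops forever):
-- those where some node reachable from a can reach itself again (a reachable cycle).
def Pre_res (a : Int) (act : Int) (hab1 : List (Int × Int)) (hab2 : List (Int × Int)) : Prop :=
  ∀ x ∈ pvR (PySem.Dict.ofList hab1) (PySem.Dict.ofList hab2) a,
    x ∉ pvReach (PySem.Dict.ofList hab1) (PySem.Dict.ofList hab2)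
        ((PySem.Dict.ofList hab1).size + (PySem.Dict.ofList hab2).size + 1)
        (pvSuccs (PySem.Dict.ofList hab1) (PySem.Dict.ofList hab2) x)

instance (a : Int) (act : Int) (hab1 : List (Int × Int)) (hab2 : List (Int × Int)) : Decidable (Pre_res a act hab1 hab2) := by unfold Pre_res; infer_instance

def pvWitness_res : Int × Int × (List (Int × Int)) × (List (Int × Int)) :=
  (1, 0, [(1, 2), (2, 3)], [(1, 5)])

def Spec_res (a : Int) (act : Int) (hab1 : List (Int × Int)) (hab2 : List (Int × Int)) (out : Int) : Prop := out = res_alt a act hab1 hab2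
instance (a : Int) (act : Int) (hab1 : List (Int × Int)) (hab2 : List (Int × Int)) (out : Int) : Decidable (Spec_res a act hab1 hab2 out) := by unfold Spec_res; infer_instance

-- ===== CLAIM (what is proved, stated in full; the proofs are below) =====
def Claim_equal_res : Prop := ∀ (a : Int) (act : Int) (hab1 : List (Int × Int)) (hab2 : List (Int × Int)), Dom_res a act hab1 hab2 → Pre_res a act hab1 hab2 → Spec_res a act hab1 hab2 (res a act hab1 hab2)

-- ===== LEMMAS AND PROOFS =====
-- everything below is proof machinery

-- count of matches per node, at the closure fuel (the canonical per-node count)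
def pvC (d1 d2 : PySem.Dict Int Int) (x : Int) : Int :=
  resCnt d1 d2 (d1.size + d2.size + 1) x

def pvRank (d1 d2 : PySem.Dict Int Int) (x : Int) : Nat := (pvR d1 d2 x).card

def pvUniv (d1 d2 : PySem.Dict Int Int) : Finset Int :=
  (d1.values ++ d2.values).toFinset

lemma mem_succs_of_child {d1 d2 : PySem.Dict Int Int} {x y : Int}
    (h : y ∈ pvChild d1 d2 x) : y ∈ pvSuccs d1 d2 x := by
  simpa [pvSuccs] using h

lemma succs_subset_univ (d1 d2 : PySem.Dict Int Int) (x : Int) :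
    pvSuccs d1 d2 x ⊆ pvUniv d1 d2 := by
  intro y hy
  simp only [pvSuccs, pvChild, List.mem_toFinset, List.mem_append, Option.mem_toList] at hy
  simp only [pvUniv, List.mem_toFinset, List.mem_append, PySem.Dict.values, List.mem_map]
  rcases hy with h | h
  · exact Or.inl ⟨(x, y), PySem.Dict.mem_items_of_get?_eq_some d1 h, rfl⟩
  · exact Or.inr ⟨(x, y), PySem.Dict.mem_items_of_get?_eq_some d2 h, rfl⟩

lemma subset_step (d1 d2 : PySem.Dict Int Int) (S : Finset Int) : S ⊆ pvStep d1 d2 S :=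
  Finset.subset_union_left

lemma step_mono (d1 d2 : PySem.Dict Int Int) {S T : Finset Int} (h : S ⊆ T) :
    pvStep d1 d2 S ⊆ pvStep d1 d2 T :=
  Finset.union_subset_union h (Finset.biUnion_subset_biUnion_of_subset_left _ h)

lemma succs_subset_step (d1 d2 : PySem.Dict Int Int) {S : Finset Int} {x : Int}
    (hx : x ∈ S) : pvSuccs d1 d2 x ⊆ pvStep d1 d2 S :=
  (Finset.subset_biUnion_of_mem _ hx).trans Finset.subset_union_right

lemma subset_reach (d1 d2 : PySem.Dict Int Int) (n : Nat) (S : Finset Int) :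
    S ⊆ pvReach d1 d2 n S := by
  induction n with
  | zero => simp [pvReach]
  | succ n ih =>
    have : pvReach d1 d2 (n+1) S = pvStep d1 d2 (pvReach d1 d2 n S) := by
      simp [pvReach, Function.iterate_succ_apply']
    rw [this]
    exact ih.trans (subset_step _ _ _)

lemma reach_mono_S (d1 d2 : PySem.Dict Int Int) (n : Nat) {S T : Finset Int} (h : S ⊆ T) :
    pvReach d1 d2 n S ⊆ pvReach d1 d2 n T := by
  induction n generalizing S T with
  | zero => simpa [pvReach]
  | succ n ih =>
    simp only [pvReach, Function.iterate_succ_apply] at *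
    exact ih (step_mono _ _ h)

lemma reach_subset_univ (d1 d2 : PySem.Dict Int Int) (n : Nat) (S : Finset Int) :
    pvReach d1 d2 n S ⊆ S ∪ pvUniv d1 d2 := by
  induction n with
  | zero => simp [pvReach]
  | succ n ih =>
    have h1 : pvReach d1 d2 (n+1) S = pvStep d1 d2 (pvReach d1 d2 n S) := by
      simp [pvReach, Function.iterate_succ_apply']
    rw [h1]
    intro y hy
    rcases Finset.mem_union.1 hy with h | h
    · exact ih h
    · rcases Finset.mem_biUnion.1 h with ⟨z, _, hz⟩
      exact Finset.mem_union_right _ (succs_subset_univ d1 d2 z hz)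

lemma univ_card_le (d1 d2 : PySem.Dict Int Int) :
    (pvUniv d1 d2).card ≤ d1.size + d2.size := by
  calc (pvUniv d1 d2).card ≤ (d1.values ++ d2.values).length := List.toFinset_card_le _
    _ = d1.size + d2.size := by
        simp [PySem.Dict.values, PySem.Dict.size]

lemma fix_propagate (d1 d2 : PySem.Dict Int Int) {S : Finset Int} {j : Nat}
    (h : pvStep d1 d2 (pvReach d1 d2 j S) = pvReach d1 d2 j S) (n : Nat) (hjn : j ≤ n) :
    pvReach d1 d2 n S = pvReach d1 d2 j S := by
  obtain ⟨k, rfl⟩ := Nat.exists_eq_add_of_le hjn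
  simp only [pvReach] at *
  rw [Nat.add_comm, Function.iterate_add_apply]
  exact Function.iterate_fixed h k

lemma chain_card (d1 d2 : PySem.Dict Int Int) (S : Finset Int) :
    ∀ k, (∃ j, j ≤ k ∧ pvStep d1 d2 (pvReach d1 d2 j S) = pvReach d1 d2 j S) ∨
      S.card + k ≤ (pvReach d1 d2 k S).card := by
  intro k
  induction k with
  | zero => right; simp [pvReach]
  | succ k ih =>
    rcases ih with ⟨j, hj, hfix⟩ | hcard
    · exact Or.inl ⟨j, hj.trans (Nat.le_succ k), hfix⟩
    · by_cases hf : pvStep d1 d2 (pvReach d1 d2 k S) = pvReach d1 d2 k S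
      · exact Or.inl ⟨k, Nat.le_succ k, hf⟩
      · right
        have hsub : pvReach d1 d2 k S ⊂ pvReach d1 d2 (k+1) S := by
          have he : pvReach d1 d2 (k+1) S = pvStep d1 d2 (pvReach d1 d2 k S) := by
            simp [pvReach, Function.iterate_succ_apply']
          rw [he]
          exact Finset.ssubset_iff_subset_ne.2 ⟨subset_step _ _ _, fun h => hf h.symm⟩
        have := Finset.card_lt_card hsub
        omega

lemma reachx_fixed (d1 d2 : PySem.Dict Int Int) (x : Int) :
    pvStep d1 d2 (pvR d1 d2 x) = pvR d1 d2 x := by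
  rcases chain_card d1 d2 {x} (d1.size + d2.size + 1) with ⟨j, hj, hfix⟩ | hcard
  · have hre : pvR d1 d2 x = pvReach d1 d2 j {x} :=
      fix_propagate d1 d2 hfix _ hj
    rw [pvR] at *
    rw [hre, hfix, ← hre]
  · exfalso
    have h1 : (pvReach d1 d2 (d1.size + d2.size + 1) {x}).card ≤ ({x} ∪ pvUniv d1 d2 : Finset Int).card :=
      Finset.card_le_card (reach_subset_univ d1 d2 _ _)
    have h2 : ({x} ∪ pvUniv d1 d2 : Finset Int).card ≤ 1 + (pvUniv d1 d2).card := by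
      have := Finset.card_union_le ({x} : Finset Int) (pvUniv d1 d2)
      simpa using this
    have h3 := univ_card_le d1 d2
    simp only [Finset.card_singleton] at hcard
    omega

lemma mem_R_self (d1 d2 : PySem.Dict Int Int) (x : Int) : x ∈ pvR d1 d2 x :=
  subset_reach d1 d2 _ _ (Finset.mem_singleton_self x)

lemma R_closed (d1 d2 : PySem.Dict Int Int) {x y : Int} (hy : y ∈ pvR d1 d2 x) :
    pvSuccs d1 d2 y ⊆ pvR d1 d2 x := by
  have := succs_subset_step d1 d2 (S := pvR d1 d2 x) hy
  rwa [reachx_fixed d1 d2 x] at this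

lemma succs_subset_R (d1 d2 : PySem.Dict Int Int) (x : Int) :
    pvSuccs d1 d2 x ⊆ pvR d1 d2 x :=
  R_closed d1 d2 (mem_R_self d1 d2 x)

lemma R_sub (d1 d2 : PySem.Dict Int Int) {x y : Int} (hy : y ∈ pvSuccs d1 d2 x) :
    pvR d1 d2 y ⊆ pvR d1 d2 x := by
  have h1 : ({y} : Finset Int) ⊆ pvR d1 d2 x := by
    simpa using succs_subset_R d1 d2 x hy
  have h2 : pvR d1 d2 y ⊆ pvReach d1 d2 (d1.size + d2.size + 1) (pvR d1 d2 x) :=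
    reach_mono_S d1 d2 _ h1
  have h3 : pvReach d1 d2 (d1.size + d2.size + 1) (pvR d1 d2 x) = pvR d1 d2 x := by
    simp only [pvReach]
    exact Function.iterate_fixed (reachx_fixed d1 d2 x) _
  rwa [h3] at h2

lemma pvRank_pos (d1 d2 : PySem.Dict Int Int) (x : Int) : 1 ≤ pvRank d1 d2 x :=
  Finset.card_pos.2 ⟨x, mem_R_self d1 d2 x⟩

lemma pvRank_le (d1 d2 : PySem.Dict Int Int) (x : Int) :
    pvRank d1 d2 x ≤ d1.size + d2.size + 1 := by
  have h1 : pvRank d1 d2 x ≤ ({x} ∪ pvUniv d1 d2 : Finset Int).card :=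
    Finset.card_le_card (reach_subset_univ d1 d2 _ _)
  have h2 : ({x} ∪ pvUniv d1 d2 : Finset Int).card ≤ 1 + (pvUniv d1 d2).card := by
    have := Finset.card_union_le ({x} : Finset Int) (pvUniv d1 d2)
    simpa using this
  have h3 := univ_card_le d1 d2
  omega

lemma pvRank_lt (d1 d2 : PySem.Dict Int Int) {a x y : Int}
    (hP : ∀ z ∈ pvR d1 d2 a, z ∉ pvReach d1 d2 (d1.size + d2.size + 1) (pvSuccs d1 d2 z))
    (hx : x ∈ pvR d1 d2 a) (hy : y ∈ pvSuccs d1 d2 x) :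
    pvRank d1 d2 y < pvRank d1 d2 x := by
  apply Finset.card_lt_card
  refine Finset.ssubset_iff_of_subset (R_sub d1 d2 hy) |>.2 ⟨x, mem_R_self d1 d2 x, ?_⟩
  intro hmem
  have h1 : pvR d1 d2 y ⊆ pvReach d1 d2 (d1.size + d2.size + 1) (pvSuccs d1 d2 x) :=
    reach_mono_S d1 d2 _ (by simpa using hy)
  exact hP x hx (h1 hmem)

lemma cnt_nonneg (d1 d2 : PySem.Dict Int Int) (f : Nat) : ∀ x, 0 ≤ resCnt d1 d2 f x := by
  induction f with
  | zero => intro x; simp [resCnt]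
  | succ f ih =>
    intro x
    simp only [resCnt]
    cases h1 : d1.get? x with
    | none =>
      cases h2 : d2.get? x with
      | none => simp
      | some v2 =>
        have := ih v2
        show (0:Int) ≤ 0 + (1 + resCnt d1 d2 f v2)
        omega
    | some v1 =>
      cases h2 : d2.get? x with
      | none =>
        have := ih v1
        show (0:Int) ≤ (1 + resCnt d1 d2 f v1) + 0
        omega
      | some v2 =>
        have := ih v1; have := ih v2
        show (0:Int) ≤ (1 + resCnt d1 d2 f v1) + (1 + resCnt d1 d2 f v2)
        omega

lemma cnt_stable (d1 d2 : PySem.Dict Int Int) {a : Int}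
    (hP : ∀ z ∈ pvR d1 d2 a, z ∉ pvReach d1 d2 (d1.size + d2.size + 1) (pvSuccs d1 d2 z)) :
    ∀ r x, x ∈ pvR d1 d2 a → pvRank d1 d2 x ≤ r →
      ∀ f g, pvRank d1 d2 x ≤ f → pvRank d1 d2 x ≤ g →
        resCnt d1 d2 f x = resCnt d1 d2 g x := by
  intro r
  induction r with
  | zero => intro x _ hr; have := pvRank_pos d1 d2 x; omega
  | succ r ih =>
    intro x hx hr f g hf hg
    have hpos := pvRank_pos d1 d2 x
    obtain ⟨f', rfl⟩ : ∃ f', f = f' + 1 := ⟨f - 1, by omega⟩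
    obtain ⟨g', rfl⟩ : ∃ g', g = g' + 1 := ⟨g - 1, by omega⟩
    simp only [resCnt]
    have hc1 : (match d1.get? x with | some v => 1 + resCnt d1 d2 f' v | none => 0)
        = (match d1.get? x with | some v => 1 + resCnt d1 d2 g' v | none => 0) := by
      cases h : d1.get? x with
      | none => rfl
      | some v =>
        have hv : v ∈ pvSuccs d1 d2 x := mem_succs_of_child (by simp [pvChild, h])
        have hlt := pvRank_lt d1 d2 hP hx hv
        have hva : v ∈ pvR d1 d2 a := R_closed d1 d2 hx hv
        simp only
        rw [ih v hva (by omega) f' g' (by omega) (by omega)]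
    have hc2 : (match d2.get? x with | some v => 1 + resCnt d1 d2 f' v | none => 0)
        = (match d2.get? x with | some v => 1 + resCnt d1 d2 g' v | none => 0) := by
      cases h : d2.get? x with
      | none => rfl
      | some v =>
        have hv : v ∈ pvSuccs d1 d2 x := mem_succs_of_child (by simp [pvChild, h])
        have hlt := pvRank_lt d1 d2 hP hx hv
        have hva : v ∈ pvR d1 d2 a := R_closed d1 d2 hx hv
        simp only
        rw [ih v hva (by omega) f' g' (by omega) (by omega)]
    rw [hc1, hc2]

lemma C_match (d1 d2 : PySem.Dict Int Int) {a x : Int}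
    (hP : ∀ z ∈ pvR d1 d2 a, z ∉ pvReach d1 d2 (d1.size + d2.size + 1) (pvSuccs d1 d2 z))
    (hx : x ∈ pvR d1 d2 a) :
    pvC d1 d2 x = (match d1.get? x with | some v => 1 + pvC d1 d2 v | none => 0)
      + (match d2.get? x with | some v => 1 + pvC d1 d2 v | none => 0) := by
  have h1 : pvC d1 d2 x = resCnt d1 d2 (d1.size + d2.size + 1) x := rfl
  rw [h1]
  simp only [resCnt]
  congr 1
  · cases h : d1.get? x with
    | none => rfl
    | some v =>
      have hv : v ∈ pvSuccs d1 d2 x := mem_succs_of_child (by simp [pvChild, h])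
      have hlt := pvRank_lt d1 d2 hP hx hv
      have hle := pvRank_le d1 d2 x
      have hva : v ∈ pvR d1 d2 a := R_closed d1 d2 hx hv
      simp only [pvC]
      rw [cnt_stable d1 d2 hP (pvRank d1 d2 v) v hva (le_refl _)
        (d1.size + d2.size) (d1.size + d2.size + 1) (by omega) (by omega)]
  · cases h : d2.get? x with
    | none => rfl
    | some v =>
      have hv : v ∈ pvSuccs d1 d2 x := mem_succs_of_child (by simp [pvChild, h])
      have hlt := pvRank_lt d1 d2 hP hx hv
      have hle := pvRank_le d1 d2 x
      have hva : v ∈ pvR d1 d2 a := R_closed d1 d2 hx hv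
      simp only [pvC]
      rw [cnt_stable d1 d2 hP (pvRank d1 d2 v) v hva (le_refl _)
        (d1.size + d2.size) (d1.size + d2.size + 1) (by omega) (by omega)]

lemma C_bound (d1 d2 : PySem.Dict Int Int) {a : Int}
    (hP : ∀ z ∈ pvR d1 d2 a, z ∉ pvReach d1 d2 (d1.size + d2.size + 1) (pvSuccs d1 d2 z)) :
    ∀ r x, x ∈ pvR d1 d2 a → pvRank d1 d2 x ≤ r →
      pvC d1 d2 x + 2 ≤ (2 : Int) ^ (pvRank d1 d2 x + 1) := by
  intro r
  induction r with
  | zero => intro x _ hr; have := pvRank_pos d1 d2 x; omega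
  | succ r ih =>
    intro x hx hr
    have hpos := pvRank_pos d1 d2 x
    have hpow1 : (2 : Int) ≤ 2 ^ pvRank d1 d2 x := by
      calc (2 : Int) = 2 ^ 1 := by ring
        _ ≤ 2 ^ pvRank d1 d2 x := pow_le_pow_right₀ one_le_two hpos
    have hb1 : (match d1.get? x with | some v => 1 + pvC d1 d2 v | none => 0)
        ≤ (2 : Int) ^ pvRank d1 d2 x - 1 := by
      cases h : d1.get? x with
      | none => simp; omega
      | some v =>
        have hv : v ∈ pvSuccs d1 d2 x := mem_succs_of_child (by simp [pvChild, h])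
        have hlt := pvRank_lt d1 d2 hP hx hv
        have hva : v ∈ pvR d1 d2 a := R_closed d1 d2 hx hv
        have hiv := ih v hva (by omega)
        have hmono : (2 : Int) ^ (pvRank d1 d2 v + 1) ≤ 2 ^ pvRank d1 d2 x :=
          pow_le_pow_right₀ one_le_two (by omega)
        show (1 + pvC d1 d2 v : Int) ≤ 2 ^ pvRank d1 d2 x - 1
        omega
    have hb2 : (match d2.get? x with | some v => 1 + pvC d1 d2 v | none => 0)
        ≤ (2 : Int) ^ pvRank d1 d2 x - 1 := by
      cases h : d2.get? x with
      | none => simp; omega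
      | some v =>
        have hv : v ∈ pvSuccs d1 d2 x := mem_succs_of_child (by simp [pvChild, h])
        have hlt := pvRank_lt d1 d2 hP hx hv
        have hva : v ∈ pvR d1 d2 a := R_closed d1 d2 hx hv
        have hiv := ih v hva (by omega)
        have hmono : (2 : Int) ^ (pvRank d1 d2 v + 1) ≤ 2 ^ pvRank d1 d2 x :=
          pow_le_pow_right₀ one_le_two (by omega)
        show (1 + pvC d1 d2 v : Int) ≤ 2 ^ pvRank d1 d2 x - 1
        omega
    have hC := C_match d1 d2 hP hx
    have hsq : (2 : Int) ^ (pvRank d1 d2 x + 1) = 2 ^ pvRank d1 d2 x * 2 := by ring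
    omega

lemma foldl_no_match (act : Int) :
    ∀ (l : List (Int × Int)) (p : Int × List Int), (∀ kv ∈ l, kv.1 ≠ act) →
      l.foldl (fun p kv => if act = kv.1 then (p.1 + 1, p.2 ++ [kv.2]) else p) p = p := by
  intro l
  induction l with
  | nil => intro p _; rfl
  | cons kv rest ih =>
    intro p h
    have hk : kv.1 ≠ act := h kv (List.mem_cons_self)
    simp only [List.foldl_cons, if_neg (fun he : act = kv.1 => hk he.symm)]
    exact ih p (fun kv' hkv' => h kv' (List.mem_cons_of_mem _ hkv'))

lemma resMatch_list (act : Int) :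
    ∀ (l : List (Int × Int)) (p : Int × List Int), (l.map Prod.fst).Nodup →
      l.foldl (fun p kv => if act = kv.1 then (p.1 + 1, p.2 ++ [kv.2]) else p) p
        = match (PySem.Dict.mk l).get? act with
          | none => p
          | some v => (p.1 + 1, p.2 ++ [v]) := by
  intro l
  induction l with
  | nil => intro p _; rfl
  | cons kv rest ih =>
    intro p hnd
    obtain ⟨k, v⟩ := kv
    have hnd1 : k ∉ rest.map Prod.fst := (List.nodup_cons.1 hnd).1
    have hnd' : (rest.map Prod.fst).Nodup := (List.nodup_cons.1 hnd).2
    by_cases hk : act = k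
    · subst hk
      have hrest : ∀ kv ∈ rest, kv.1 ≠ act := by
        intro kv hkv he
        exact hnd1 (by simpa [← he] using List.mem_map_of_mem (f := Prod.fst) hkv)
      simp only [List.foldl_cons, if_pos]
      rw [foldl_no_match act rest _ hrest]
      rw [PySem.Dict.get?_mk_cons]
      simp
    · have hbeq : (k == act) = false := beq_eq_false_iff_ne.2 (fun he : k = act => hk he.symm)
      simp only [List.foldl_cons, if_neg hk]
      rw [PySem.Dict.get?_mk_cons, hbeq]
      simpa using ih p hnd'

lemma resMatch_eq (d : PySem.Dict Int Int) (hnd : d.keys.Nodup) (act : Int) (p : Int × List Int) :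
    resMatch d act p = match d.get? act with
      | none => p
      | some v => (p.1 + 1, p.2 ++ [v]) := by
  obtain ⟨l⟩ := d
  exact resMatch_list act l p (by simpa [PySem.Dict.keys] using hnd)

lemma loop_sum (d1 d2 : PySem.Dict Int Int) {a : Int}
    (hn1 : d1.keys.Nodup) (hn2 : d2.keys.Nodup)
    (hP : ∀ z ∈ pvR d1 d2 a, z ∉ pvReach d1 d2 (d1.size + d2.size + 1) (pvSuccs d1 d2 z)) :
    ∀ (F : Nat) (s : Int) (L : List Int), (∀ x ∈ L, x ∈ pvR d1 d2 a) →
      ((L.map (fun x => pvC d1 d2 x + 1)).sum ≤ (F : Int)) →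
      resLoop d1 d2 F s L = s + (L.map (pvC d1 d2)).sum := by
  intro F
  induction F with
  | zero =>
    intro s L hmem hfuel
    cases L with
    | nil => simp [resLoop]
    | cons x L' =>
      exfalso
      have h0 : 0 ≤ pvC d1 d2 x := cnt_nonneg d1 d2 _ x
      have hrest : 0 ≤ (L'.map (fun x => pvC d1 d2 x + 1)).sum := by
        apply List.sum_nonneg
        intro y hy
        simp only [List.mem_map] at hy
        obtain ⟨z, _, rfl⟩ := hy
        have := cnt_nonneg d1 d2 (d1.size + d2.size + 1) z
        simp only [pvC]
        omega
      simp only [List.map_cons, List.sum_cons, Nat.cast_zero] at hfuel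
      omega
  | succ F ih =>
    intro s L hmem hfuel
    cases hL : L.getLast? with
    | none =>
      have : L = [] := List.getLast?_eq_none_iff.1 hL
      subst this
      simp [resLoop]
    | some act =>
      have hsplit : L.dropLast ++ [act] = L :=
        List.dropLast_append_getLast? act (by simp [hL])
      have hact : act ∈ pvR d1 d2 a := hmem act (by rw [← hsplit]; simp)
      have hmem' : ∀ x ∈ L.dropLast, x ∈ pvR d1 d2 a := by
        intro x hx
        exact hmem x (by rw [← hsplit]; exact List.mem_append_left _ hx)
      have hCact := C_match d1 d2 hP hact
      have hsum : (L.map (fun x => pvC d1 d2 x + 1)).sum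
          = (L.dropLast.map (fun x => pvC d1 d2 x + 1)).sum + (pvC d1 d2 act + 1) := by
        conv_lhs => rw [← hsplit]
        simp
      have hsumC : (L.map (pvC d1 d2)).sum
          = (L.dropLast.map (pvC d1 d2)).sum + pvC d1 d2 act := by
        conv_lhs => rw [← hsplit]
        simp
      push_cast at hfuel
      have hchild : ∀ v, v ∈ pvChild d1 d2 act → v ∈ pvR d1 d2 a :=
        fun v hv => R_closed d1 d2 hact (mem_succs_of_child hv)
      simp only [resLoop, hL]
      rw [resMatch_eq d1 hn1, resMatch_eq d2 hn2]
      cases h1 : d1.get? act with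
      | none =>
        cases h2 : d2.get? act with
        | none =>
          have hCa : pvC d1 d2 act = 0 := by simp [hCact, h1, h2]
          simp only
          rw [ih s L.dropLast hmem' (by omega)]
          omega
        | some v2 =>
          have hv2 : v2 ∈ pvR d1 d2 a := hchild v2 (by simp [pvChild, h1, h2])
          have hCa : pvC d1 d2 act = 0 + (1 + pvC d1 d2 v2) := by simp [hCact, h1, h2]
          have hmem2 : ∀ x ∈ L.dropLast ++ [v2], x ∈ pvR d1 d2 a := by
            intro x hx
            rcases List.mem_append.1 hx with h | h
            · exact hmem' x h
            · simp at h; subst h; exact hv2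
          have hfl : ((L.dropLast ++ [v2]).map (fun x => pvC d1 d2 x + 1)).sum ≤ (F : Int) := by
            simp only [List.map_append, List.sum_append, List.map_cons, List.sum_cons,
              List.map_nil, List.sum_nil]
            omega
          simp only
          rw [ih (s + 1) (L.dropLast ++ [v2]) hmem2 hfl]
          simp only [List.map_append, List.sum_append, List.map_cons, List.sum_cons,
            List.map_nil, List.sum_nil]
          omega
      | some v1 =>
        have hv1 : v1 ∈ pvR d1 d2 a := hchild v1 (by simp [pvChild, h1])
        cases h2 : d2.get? act with
        | none =>
          have hCa : pvC d1 d2 act = (1 + pvC d1 d2 v1) + 0 := by simp [hCact, h1, h2]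
          have hmem2 : ∀ x ∈ L.dropLast ++ [v1], x ∈ pvR d1 d2 a := by
            intro x hx
            rcases List.mem_append.1 hx with h | h
            · exact hmem' x h
            · simp at h; subst h; exact hv1
          have hfl : ((L.dropLast ++ [v1]).map (fun x => pvC d1 d2 x + 1)).sum ≤ (F : Int) := by
            simp only [List.map_append, List.sum_append, List.map_cons, List.sum_cons,
              List.map_nil, List.sum_nil]
            omega
          simp only
          rw [ih (s + 1) (L.dropLast ++ [v1]) hmem2 hfl]
          simp only [List.map_append, List.sum_append, List.map_cons, List.sum_cons,
            List.map_nil, List.sum_nil]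
          omega
        | some v2 =>
          have hv2 : v2 ∈ pvR d1 d2 a := hchild v2 (by simp [pvChild, h2])
          have hCa : pvC d1 d2 act = (1 + pvC d1 d2 v1) + (1 + pvC d1 d2 v2) := by simp [hCact, h1, h2]
          have hmem2 : ∀ x ∈ L.dropLast ++ [v1] ++ [v2], x ∈ pvR d1 d2 a := by
            intro x hx
            rcases List.mem_append.1 hx with h | h
            · rcases List.mem_append.1 h with h' | h'
              · exact hmem' x h'
              · simp at h'; subst h'; exact hv1
            · simp at h; subst h; exact hv2
          have hfl : ((L.dropLast ++ [v1] ++ [v2]).map (fun x => pvC d1 d2 x + 1)).sum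
              ≤ (F : Int) := by
            simp only [List.map_append, List.sum_append, List.map_cons, List.sum_cons,
              List.map_nil, List.sum_nil]
            omega
          simp only
          rw [ih (s + 1 + 1) (L.dropLast ++ [v1] ++ [v2]) hmem2 hfl]
          simp only [List.map_append, List.sum_append, List.map_cons, List.sum_cons,
            List.map_nil, List.sum_nil]
          omega

lemma size_foldl_insert_le (l : List (Int × Int)) :
    ∀ d : PySem.Dict Int Int,
      (List.foldl (fun acc p => acc.insert p.1 p.2) d l).size ≤ d.size + l.length := by
  induction l with
  | nil => intro d; simp
  | cons p rest ih =>
    intro d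
    have h1 := ih (d.insert p.1 p.2)
    have h2 : (d.insert p.1 p.2).size ≤ d.size + 1 := by
      rw [PySem.Dict.size_insert]
      split_ifs <;> omega
    simp only [List.foldl_cons, List.length_cons]
    omega

lemma size_ofList_le (l : List (Int × Int)) : (PySem.Dict.ofList l).size ≤ l.length := by
  have := size_foldl_insert_le l PySem.Dict.empty
  simpa [PySem.Dict.ofList, PySem.Dict.update, PySem.Dict.empty, PySem.Dict.size] using this

-- ===== VERDICT (by name: the statement is the Claim_ definition above) =====
theorem res_spec : Claim_equal_res := by
  intro a act hab1 hab2 _hDom hPre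
  unfold Spec_res
  set d1 := PySem.Dict.ofList hab1 with hd1
  set d2 := PySem.Dict.ofList hab2 with hd2
  have hP : ∀ z ∈ pvR d1 d2 a, z ∉ pvReach d1 d2 (d1.size + d2.size + 1) (pvSuccs d1 d2 z) := by
    intro z hz
    exact hPre z hz
  have hrle := pvRank_le d1 d2 a
  have hs1 : d1.size ≤ hab1.length := size_ofList_le hab1
  have hs2 : d2.size ≤ hab2.length := size_ofList_le hab2
  have hmem : ∀ x ∈ [a], x ∈ pvR d1 d2 a := by
    intro x hx; simp at hx; simpa [hx] using mem_R_self d1 d2 a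
  have hCb := C_bound d1 d2 hP (pvRank d1 d2 a) a (mem_R_self d1 d2 a) (le_refl _)
  have hpow : (2 : Int) ^ (pvRank d1 d2 a + 1) ≤ 2 ^ (hab1.length + hab2.length + 2) :=
    pow_le_pow_right₀ one_le_two (by omega)
  have hcast : ((2 ^ (hab1.length + hab2.length + 2) : Nat) : Int)
      = (2 : Int) ^ (hab1.length + hab2.length + 2) := by
    push_cast
    norm_num
  have hfuel : (([a].map (fun x => pvC d1 d2 x + 1)).sum
      ≤ ((2 ^ (hab1.length + hab2.length + 2) : Nat) : Int)) := by
    simp only [List.map_cons, List.map_nil, List.sum_cons, List.sum_nil]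
    rw [hcast]
    omega
  have hres : res a act hab1 hab2 = 0 + ([a].map (pvC d1 d2)).sum := by
    unfold res
    exact loop_sum d1 d2 (PySem.Dict.nodup_keys_ofList hab1) (PySem.Dict.nodup_keys_ofList hab2)
      hP _ 0 [a] hmem hfuel
  have halt : res_alt a act hab1 hab2 = pvC d1 d2 a := by
    unfold res_alt pvC
    exact cnt_stable d1 d2 hP (pvRank d1 d2 a) a (mem_R_self d1 d2 a) (le_refl _)
      _ _ (by omega) (by omega)
  rw [hres, halt]
  simp
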